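-- pv_equiv track=rewrite | github.com/drandrewthomas/Python3-3D-photos-utilities-and-library | photos3d/jpegtool.py | split_images
-- ===== SOURCE A (Python) =====
-- def split_images(markers):
--     # Any markers not within SOI/EOI ignored
--     ims = []
--     im = []
--     stwait = True
--     for marker in markers:
--         if stwait:
--             if marker[3] == "SOI":
--                 stwait = False
--         if not stwait:
--             im.append(marker)
--             if marker[3] == "EOI":
--                 ims.append(im)
--                 im = []
--                 stwait = True
--     return ims
-- ===== SOURCE B (Python) =====
-- def split_images(markers):
--     # Index-pointer scan: find next SOI, then the first EOI at or after it,
--     # emit that slice as one image, continue after it.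
--     ims = []
--     n = len(markers)
--     pos = 0
--     while True:
--         i = pos
--         while i < n and markers[i][3] != "SOI":
--             i += 1
--         if i == n:
--             return ims
--         j = i
--         while j < n and markers[j][3] != "EOI":
--             j += 1
--         if j == n:
--             return ims
--         ims.append(markers[i:j + 1])
--         pos = j + 1
-- ===== Notes on version B (the rewrite author's own statement) =====
-- stated objective: alternative
-- what changed: Replaced the boolean state-flag fold (stwait/im accumulator) by an index-pointer scan: repeatedly locate the next SOI, then the first EOI after it, and emit that slice as one image.
import Mathlib
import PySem

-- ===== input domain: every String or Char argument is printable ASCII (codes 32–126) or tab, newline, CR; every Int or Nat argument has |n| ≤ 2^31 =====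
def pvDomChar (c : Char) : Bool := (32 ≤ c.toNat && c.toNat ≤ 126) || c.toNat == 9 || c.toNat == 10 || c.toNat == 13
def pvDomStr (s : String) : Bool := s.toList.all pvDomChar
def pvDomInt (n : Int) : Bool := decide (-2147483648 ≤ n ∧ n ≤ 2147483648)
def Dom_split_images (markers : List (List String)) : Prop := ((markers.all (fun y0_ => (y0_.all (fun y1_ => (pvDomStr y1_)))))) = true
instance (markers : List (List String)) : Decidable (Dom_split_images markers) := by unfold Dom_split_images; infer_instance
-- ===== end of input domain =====

-- B replaces A's boolean state-flag fold by an index-pointer scan (find next SOI, then the first EOI after it, emit the slice); equivalence proved on inputs whose markers all have at least 4 fields (A indexes marker[3]).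

-- ===== PORT A =====
-- marker[3]; total under Pre_ (every marker has length ≥ 4, so getD never uses the default)
def m3 (m : List String) : String := m.getD 3 ""

-- one fold step of A's loop; state = (ims, (im, stwait))
def aStep (s : List (List (List String)) × List (List String) × Bool) (marker : List String) :
    List (List (List String)) × List (List String) × Bool :=
  let ims := s.1
  let im := s.2.1
  let stwait := s.2.2
  let stwait := if stwait then (if m3 marker = "SOI" then false else stwait) else stwait
  if stwait = false then
    let im := im ++ [marker]
    if m3 marker = "EOI" then (ims ++ [im], ([], true))
    else (ims, (im, stwait))
  else (ims, (im, stwait))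

def split_images (markers : List (List String)) : List (List (List String)) :=
  (markers.foldl aStep ([], ([], true))).1

-- ===== PORT B =====
-- scan from an SOI up to and including the first EOI; none = no EOI remains (drop the open segment)
def takeToEOI : List (List String) → Option (List (List String) × List (List String))
  | [] => none
  | m :: t =>
    if m3 m = "EOI" then some ([m], t)
    else
      match takeToEOI t with
      | none => none
      | some (seg, rest) => some (m :: seg, rest)

theorem takeToEOI_rest_lt : ∀ (ms seg rest : List (List String)),
    takeToEOI ms = some (seg, rest) → rest.length < ms.length := by
  intro ms
  induction ms with
  | nil => intro seg rest h; simp [takeToEOI] at h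
  | cons m t ih =>
    intro seg rest h
    simp only [takeToEOI] at h
    split at h
    · cases h; simp
    · cases htk : takeToEOI t with
      | none => rw [htk] at h; exact absurd h (by simp)
      | some p =>
        obtain ⟨seg1, rest1⟩ := p
        rw [htk] at h
        simp only [Option.some.injEq, Prod.mk.injEq] at h
        obtain ⟨-, hr⟩ := h
        subst hr
        simpa using Nat.lt_succ_of_lt (ih seg1 rest1 htk)

-- B's outer loop: skip to the next SOI, cut off one image, continue after it
def altGo : List (List String) → List (List (List String))
  | [] => []
  | m :: t =>
    if m3 m = "SOI" then
      match h : takeToEOI (m :: t) with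
      | none => []
      | some (seg, rest) => seg :: altGo rest
    else altGo t
termination_by ms => ms.length
decreasing_by
  · exact takeToEOI_rest_lt _ _ _ h
  · simp

def split_images_alt (markers : List (List String)) : List (List (List String)) :=
  altGo markers

-- ===== PRECONDITION & SPEC =====
-- A evaluates marker[3] for every marker, so it raises IndexError exactly when some marker has fewer than 4 fields.
def Pre_split_images (markers : List (List String)) : Prop := ∀ m ∈ markers, 4 ≤ m.length
instance (markers : List (List String)) : Decidable (Pre_split_images markers) := by unfold Pre_split_images; infer_instance
def pvWitness_split_images : List (List String) :=
  [["00", "0", "2", "SOI"], ["02", "2", "4", "APP0"], ["04", "4", "6", "EOI"]]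

def Spec_split_images (markers : List (List String)) (out : List (List (List String))) : Prop := out = split_images_alt markers
instance (markers : List (List String)) (out : List (List (List String))) : Decidable (Spec_split_images markers out) := by unfold Spec_split_images; infer_instance

-- ===== CLAIM (what is proved, stated in full; the proofs are below) =====
def Claim_equal_split_images : Prop := ∀ (markers : List (List String)), Dom_split_images markers → Pre_split_images markers → Spec_split_images markers (split_images markers)

-- ===== LEMMAS AND PROOFS =====

theorem altGo_nil : altGo [] = [] := by rw [altGo]

theorem altGo_cons_not_soi (m : List String) (t : List (List String)) (hs : m3 m ≠ "SOI") :
    altGo (m :: t) = altGo t := by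
  rw [altGo]; simp [hs]

theorem altGo_cons_soi_none (m : List String) (t : List (List String)) (hs : m3 m = "SOI")
    (htk : takeToEOI (m :: t) = none) : altGo (m :: t) = [] := by
  rw [altGo]
  simp only [hs, if_true]
  split
  · rfl
  · rename_i seg rest h; rw [htk] at h; cases h

theorem altGo_cons_soi_some (m : List String) (t : List (List String))
    (seg rest : List (List String)) (hs : m3 m = "SOI")
    (htk : takeToEOI (m :: t) = some (seg, rest)) :
    altGo (m :: t) = seg :: altGo rest := by
  rw [altGo]
  simp only [hs, if_true]
  split
  · rename_i h; rw [htk] at h; cases h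
  · rename_i seg1 rest1 h
    rw [htk] at h
    cases h
    rfl

-- A's loop in the collecting state (stwait = false) accumulates exactly takeToEOI's segment
theorem fold_collect : ∀ (ms : List (List String)) (ims : List (List (List String))) (im : List (List String)),
    (ms.foldl aStep (ims, (im, false))).1 =
      match takeToEOI ms with
      | none => ims
      | some (seg, rest) => (rest.foldl aStep (ims ++ [im ++ seg], ([], true))).1 := by
  intro ms
  induction ms with
  | nil => intro ims im; simp [takeToEOI]
  | cons m t ih =>
    intro ims im
    by_cases he : m3 m = "EOI"
    · have hstep : aStep (ims, (im, false)) m = (ims ++ [im ++ [m]], ([], true)) := by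
        simp [aStep, he]
      have htk : takeToEOI (m :: t) = some ([m], t) := by
        simp [takeToEOI, he]
      rw [List.foldl_cons, hstep, htk]
    · have hstep : aStep (ims, (im, false)) m = (ims, (im ++ [m], false)) := by
        simp [aStep, he]
      rw [List.foldl_cons, hstep, ih]
      cases htk : takeToEOI t with
      | none =>
        have : takeToEOI (m :: t) = none := by simp [takeToEOI, he, htk]
        rw [this]
      | some p =>
        obtain ⟨seg, rest⟩ := p
        have : takeToEOI (m :: t) = some (m :: seg, rest) := by
          simp [takeToEOI, he, htk]
        rw [this]
        simp

-- A's loop in the waiting state (stwait = true) computes B's altGo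
theorem fold_wait : ∀ (n : ℕ) (ms : List (List String)), ms.length ≤ n →
    ∀ (ims : List (List (List String))),
      (ms.foldl aStep (ims, ([], true))).1 = ims ++ altGo ms := by
  intro n
  induction n with
  | zero =>
    intro ms h ims
    have : ms = [] := List.eq_nil_of_length_eq_zero (Nat.le_zero.mp h)
    subst this
    simp [altGo_nil]
  | succ n ih =>
    intro ms h ims
    cases ms with
    | nil => simp [altGo_nil]
    | cons m t =>
      by_cases hs : m3 m = "SOI"
      · have hne : m3 m ≠ "EOI" := by rw [hs]; decide
        have hstep : aStep (ims, ([], true)) m = (ims, ([m], false)) := by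
          simp [aStep, hs]
        rw [List.foldl_cons, hstep, fold_collect]
        cases htk : takeToEOI t with
        | none =>
          have htkc : takeToEOI (m :: t) = none := by simp [takeToEOI, hne, htk]
          rw [altGo_cons_soi_none m t hs htkc]
          simp
        | some p =>
          obtain ⟨seg, rest⟩ := p
          have htkc : takeToEOI (m :: t) = some (m :: seg, rest) := by
            simp [takeToEOI, hne, htk]
          have hrest : rest.length ≤ n := by
            have := takeToEOI_rest_lt t seg rest htk
            simp at h
            omega
          rw [altGo_cons_soi_some m t (m :: seg) rest hs htkc]
          simp [ih rest hrest]
      · have hstep : aStep (ims, ([], true)) m = (ims, ([], true)) := by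
          simp [aStep, hs]
        have ht : t.length ≤ n := by simp at h; omega
        rw [List.foldl_cons, hstep, ih t ht, altGo_cons_not_soi m t hs]

-- ===== VERDICT (by name: the statement is the Claim_ definition above) =====
theorem split_images_spec : Claim_equal_split_images := by
  intro markers _ _
  unfold Spec_split_images split_images split_images_alt
  simpa using fold_wait markers.length markers (le_refl _) []
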